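-- pv_equiv track=rewrite | github.com/EoaNB-Team/EoaNB | toi/documentation/Event date calculation/Convert_OSE_to_KDE.py | date_calc
-- ===== SOURCE A (Python) =====
-- months = [-1, 31, 28, 31, 30, 31, 30, 31, 31, 30, 31, 30, 31]
--
-- def date_calc(event_year, event_month, event_day, start_year = 1858, s_m = 1, s_d = 1):
-- 	year = event_year-start_year
-- 	month = s_m
-- 	day = event_day-s_d
--
-- 	if month > event_month:
-- 		year -= 1
--
-- 	days = 0
-- 	while month != event_month: # Add months to days
-- 		days += months[month]
-- 		if month == 12:
-- 			month = 1
-- 		else: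
-- 			month += 1
--
-- 	days += year*365+day # Convert a date into days
--
-- 	if start_year == 1857:
-- 		KDE_scripted_effect = "on_startup"
-- 	else:
--  		KDE_scripted_effect = "KDE_bi_yearly_event_fire_" + str(start_year)
--
-- 	return int(days), KDE_scripted_effect
-- ===== SOURCE B (Python) =====
-- months = [-1, 31, 28, 31, 30, 31, 30, 31, 31, 30, 31, 30, 31]
--
-- # prefix sums of months[1..k]: _CUM[k] = months[1] + ... + months[k]
-- _CUM = [0, 31, 59, 90, 120, 151, 181, 212, 243, 273, 304, 334, 365]
--
-- def date_calc(event_year, event_month, event_day, start_year = 1858, s_m = 1, s_d = 1):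
--     if s_m <= event_month:
--         days = _CUM[event_month - 1] - _CUM[s_m - 1]
--         year = event_year - start_year
--     else:
--         days = (_CUM[12] - _CUM[s_m - 1]) + _CUM[event_month - 1]
--         year = event_year - start_year - 1
--     days += year * 365 + (event_day - s_d)
--     if start_year == 1857:
--         KDE_scripted_effect = "on_startup"
--     else:
--         KDE_scripted_effect = "KDE_bi_yearly_event_fire_" + str(start_year)
--     return days, KDE_scripted_effect
-- ===== Notes on version B (the rewrite author's own statement) =====
-- stated objective: simpler
-- what changed: Replaced A's month-by-month while loop (with December wraparound) by closed-form subtraction on a precomputed prefix-sum table of the month lengths, folding the year decrement into the same branch.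
-- outside the precondition, e.g. on date_calc(1857, 1, 1, 1857, 0, 1): A returns (-1, 'on_startup'), B returns (-365, 'on_startup')
import Mathlib
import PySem

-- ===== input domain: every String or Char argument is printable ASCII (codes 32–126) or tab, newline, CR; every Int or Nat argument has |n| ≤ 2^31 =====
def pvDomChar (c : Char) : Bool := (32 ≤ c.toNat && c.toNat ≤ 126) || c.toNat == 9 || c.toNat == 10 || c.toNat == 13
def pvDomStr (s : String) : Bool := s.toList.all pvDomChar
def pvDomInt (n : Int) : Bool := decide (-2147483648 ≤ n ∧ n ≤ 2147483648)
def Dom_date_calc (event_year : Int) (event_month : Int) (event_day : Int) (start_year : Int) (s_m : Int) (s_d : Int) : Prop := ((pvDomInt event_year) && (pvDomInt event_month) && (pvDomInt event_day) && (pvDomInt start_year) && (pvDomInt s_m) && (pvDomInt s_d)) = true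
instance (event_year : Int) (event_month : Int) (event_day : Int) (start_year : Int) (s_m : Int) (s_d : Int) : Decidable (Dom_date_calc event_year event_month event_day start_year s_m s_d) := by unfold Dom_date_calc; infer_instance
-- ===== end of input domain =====

-- B replaces A's month-stepping while loop by closed-form subtraction on a precomputed
-- prefix-sum table of the month lengths (objective: simpler / constant-time month sum).

-- ===== PORT A =====
def pvMonths : List Int := [-1, 31, 28, 31, 30, 31, 30, 31, 31, 30, 31, 30, 31]

-- A's while loop; fuel only makes the recursion total (the loop takes at most 25 steps wherever Python A terminates).
def date_calc_loop : Nat → Int → Int → Int → Int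
| 0, _, _, days => days
| (f+1), month, em, days =>
  if month ≠ em then
    date_calc_loop f (if month = 12 then 1 else month + 1) em
      (days + (PySem.List.pyGet? pvMonths month).getD 0)
  else days

def date_calc (event_year : Int) (event_month : Int) (event_day : Int) (start_year : Int) (s_m : Int) (s_d : Int) : Int × String :=
  let year := event_year - start_year
  let month := s_m
  let day := event_day - s_d
  let year := if month > event_month then year - 1 else year
  let days := date_calc_loop 26 month event_month 0
  let days := days + year * 365 + day
  let eff := if start_year = 1857 then "on_startup"
             else "KDE_bi_yearly_event_fire_" ++ PySem.Int.toStr start_year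
  (days, eff)

-- ===== PORT B =====
-- prefix sums of pvMonths[1..k]
def pvCum : List Int := [0, 31, 59, 90, 120, 151, 181, 212, 243, 273, 304, 334, 365]

def date_calc_alt (event_year : Int) (event_month : Int) (event_day : Int) (start_year : Int) (s_m : Int) (s_d : Int) : Int × String :=
  let p :=
    if s_m ≤ event_month then
      ((PySem.List.pyGet? pvCum (event_month - 1)).getD 0
         - (PySem.List.pyGet? pvCum (s_m - 1)).getD 0,
       event_year - start_year)
    else
      (((PySem.List.pyGet? pvCum 12).getD 0 - (PySem.List.pyGet? pvCum (s_m - 1)).getD 0)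
         + (PySem.List.pyGet? pvCum (event_month - 1)).getD 0,
       event_year - start_year - 1)
  let days := p.1 + p.2 * 365 + (event_day - s_d)
  let eff := if start_year = 1857 then "on_startup"
             else "KDE_bi_yearly_event_fire_" ++ PySem.Int.toStr start_year
  (days, eff)

-- ===== PRECONDITION & SPEC =====
-- Pre_ restricts both month arguments to the natural calendar domain 1..12: outside it A
-- either loops forever (event_month ∉ 1..12), raises IndexError (s_m < -13 or s_m > 12),
-- or returns a value only by Python's negative-index wraparound / the -1 sentinel months[0].
def Pre_date_calc (event_year : Int) (event_month : Int) (event_day : Int) (start_year : Int) (s_m : Int) (s_d : Int) : Prop :=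
  1 ≤ event_month ∧ event_month ≤ 12 ∧ 1 ≤ s_m ∧ s_m ≤ 12
instance (event_year : Int) (event_month : Int) (event_day : Int) (start_year : Int) (s_m : Int) (s_d : Int) : Decidable (Pre_date_calc event_year event_month event_day start_year s_m s_d) := by unfold Pre_date_calc; infer_instance

def pvWitness_date_calc : Int × Int × Int × Int × Int × Int := (1936, 7, 4, 1858, 1, 1)

def Spec_date_calc (event_year : Int) (event_month : Int) (event_day : Int) (start_year : Int) (s_m : Int) (s_d : Int) (out : Int × String) : Prop := out = date_calc_alt event_year event_month event_day start_year s_m s_d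
instance (event_year : Int) (event_month : Int) (event_day : Int) (start_year : Int) (s_m : Int) (s_d : Int) (out : Int × String) : Decidable (Spec_date_calc event_year event_month event_day start_year s_m s_d out) := by unfold Spec_date_calc; infer_instance

-- ===== CLAIM (what is proved, stated in full; the proofs are below) =====
def Claim_equal_date_calc : Prop := ∀ (event_year : Int) (event_month : Int) (event_day : Int) (start_year : Int) (s_m : Int) (s_d : Int), Dom_date_calc event_year event_month event_day start_year s_m s_d → Pre_date_calc event_year event_month event_day start_year s_m s_d → Spec_date_calc event_year event_month event_day start_year s_m s_d (date_calc event_year event_month event_day start_year s_m s_d)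

-- ===== LEMMAS AND PROOFS =====
-- The loop's value equals B's prefix-sum expression, for months in 1..12 (144 finite cases).
theorem loop_eq_cum (em sm : Int) (hem1 : 1 ≤ em) (hem2 : em ≤ 12) (hsm1 : 1 ≤ sm) (hsm2 : sm ≤ 12) :
    date_calc_loop 26 sm em 0 =
      (if sm ≤ em then
        (PySem.List.pyGet? pvCum (em - 1)).getD 0 - (PySem.List.pyGet? pvCum (sm - 1)).getD 0
       else
        ((PySem.List.pyGet? pvCum 12).getD 0 - (PySem.List.pyGet? pvCum (sm - 1)).getD 0)
          + (PySem.List.pyGet? pvCum (em - 1)).getD 0) := by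
  interval_cases em <;> interval_cases sm <;> decide

-- ===== VERDICT (by name: the statement is the Claim_ definition above) =====
theorem date_calc_spec : Claim_equal_date_calc := by
  intro ey em ed sy sm sd _ hpre
  obtain ⟨hem1, hem2, hsm1, hsm2⟩ := hpre
  unfold Spec_date_calc date_calc date_calc_alt
  simp only [loop_eq_cum em sm hem1 hem2 hsm1 hsm2]
  by_cases h : sm ≤ em
  · simp only [if_pos h, if_neg (not_lt.mpr h)]
  · simp only [if_neg h, if_pos (lt_of_not_ge h)]
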